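-- pv_equiv track=rewrite | github.com/yuichiinumaru/overpowers | skills/one-click-posting/scripts/build_publish_packet.py | normalize_platforms
-- ===== SOURCE A (Python) =====
-- ALLOWED_PLATFORMS = ("xiaohongshu", "x", "zhihu")
--
-- def normalize_list(text: str):
--     result = []
--     seen = set()
--     for raw in text.split(","):
--         item = raw.strip()
--         if not item:
--             continue
--         if item in seen:
--             continue
--         seen.add(item)
--         result.append(item)
--     return result
--
-- def normalize_platforms(platform_args):
--     raw_items = []
--     for item in platform_args:
--         if not item:
--             continue
--         raw_items.extend(normalize_list(item))
--
--     platforms = []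
--     seen = set()
--     for item in raw_items:
--         lowered = item.strip().lower()
--         if not lowered:
--             continue
--         if lowered not in ALLOWED_PLATFORMS:
--             allowed = ", ".join(ALLOWED_PLATFORMS)
--             raise ValueError(f"Unsupported platform: {lowered}. Allowed: {allowed}")
--         if lowered in seen:
--             continue
--         seen.add(lowered)
--         platforms.append(lowered)
--
--     if not platforms:
--         raise ValueError("At least one valid platform is required")
--
--     return platforms
-- ===== SOURCE B (Python) =====
-- ALLOWED_PLATFORMS = ("xiaohongshu", "x", "zhihu")
--
-- def normalize_platforms(platform_args):
--     platforms = []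
--     seen = set()
--     for item in platform_args:
--         if not item:
--             continue
--         for raw in item.split(","):
--             lowered = raw.strip().lower()
--             if not lowered:
--                 continue
--             if lowered not in ALLOWED_PLATFORMS:
--                 allowed = ", ".join(ALLOWED_PLATFORMS)
--                 raise ValueError(f"Unsupported platform: {lowered}. Allowed: {allowed}")
--             if lowered in seen:
--                 continue
--             seen.add(lowered)
--             platforms.append(lowered)
--     if not platforms:
--         raise ValueError("At least one valid platform is required")
--     return platforms
-- ===== Notes on version B (the rewrite author's own statement) =====
-- stated objective: simpler
-- what changed: Replaces the two-pass pipeline (per-string raw dedup via normalize_list into an intermediate raw_items list, then a second validate/lower/dedup pass) by one combined pass over the tokens with a single lowered-key seen-set; the raw-item dedup stage and intermediate list disappear.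
-- outside the precondition, e.g. on normalize_platforms(['bad']): A raises ValueError, B raises ValueError; on normalize_platforms([' , ']): A raises ValueError, B raises ValueError
import Mathlib
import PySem

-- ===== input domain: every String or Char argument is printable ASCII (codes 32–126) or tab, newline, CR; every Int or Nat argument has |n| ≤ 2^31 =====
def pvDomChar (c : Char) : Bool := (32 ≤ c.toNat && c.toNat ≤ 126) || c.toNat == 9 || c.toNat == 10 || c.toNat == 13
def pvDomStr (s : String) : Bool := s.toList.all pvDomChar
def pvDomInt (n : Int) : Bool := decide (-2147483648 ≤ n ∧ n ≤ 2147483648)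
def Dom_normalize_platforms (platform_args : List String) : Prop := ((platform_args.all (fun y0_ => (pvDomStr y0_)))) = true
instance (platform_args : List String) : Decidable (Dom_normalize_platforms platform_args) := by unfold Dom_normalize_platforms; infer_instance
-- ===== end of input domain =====

-- B merges A's two passes (per-string raw dedup into an intermediate raw_items list, then a
-- validate/lower/dedup pass) into one combined pass with a single lowered-key seen-set.


-- ===== PORT A =====
def pvALLOWED : List String := ["xiaohongshu", "x", "zhihu"]   -- ALLOWED_PLATFORMS

-- body of A's normalize_list loop ('item' is written out as 'PySem.Str.strip raw')
def pvDStep (st : List String × PySem.Set String) (raw : String) : List String × PySem.Set String :=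
  if PySem.Str.strip raw = "" then st
  else if st.2.contains (PySem.Str.strip raw) then st
  else (st.1 ++ [PySem.Str.strip raw], st.2.add (PySem.Str.strip raw))

-- normalize_list: text.split(",") is PySem.Str.split? with the nonempty literal sep "," (always some)
def normalize_list (text : String) : List String :=
  (((PySem.Str.split? text ",").getD []).foldl pvDStep ([], PySem.Set.empty)).1

-- body of A's second loop ('lowered' written out); on 'lowered not in ALLOWED_PLATFORMS' Python
-- raises ValueError — Pre_normalize_platforms excludes those inputs, here the token is dropped
def pvStepA (st : List String × PySem.Set String) (item : String) : List String × PySem.Set String :=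
  if PySem.Str.lower (PySem.Str.strip item) = "" then st
  else if ¬ PySem.Str.lower (PySem.Str.strip item) ∈ pvALLOWED then st   -- Python: raise (outside Pre_)
  else if st.2.contains (PySem.Str.lower (PySem.Str.strip item)) then st
  else (st.1 ++ [PySem.Str.lower (PySem.Str.strip item)], st.2.add (PySem.Str.lower (PySem.Str.strip item)))

def normalize_platforms (platform_args : List String) : List String :=
  let raw_items := platform_args.foldl
    (fun acc item => if item = "" then acc else acc ++ normalize_list item) []
  let platforms := (raw_items.foldl pvStepA ([], PySem.Set.empty)).1
  platforms   -- Python raises ValueError when platforms = []; excluded by Pre_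

-- ===== PORT B =====
-- body of B's single inner loop (the same Python statements as A's second loop body)
def pvStepB (st : List String × PySem.Set String) (raw : String) : List String × PySem.Set String :=
  if PySem.Str.lower (PySem.Str.strip raw) = "" then st
  else if ¬ PySem.Str.lower (PySem.Str.strip raw) ∈ pvALLOWED then st   -- Python: raise (outside Pre_)
  else if st.2.contains (PySem.Str.lower (PySem.Str.strip raw)) then st
  else (st.1 ++ [PySem.Str.lower (PySem.Str.strip raw)], st.2.add (PySem.Str.lower (PySem.Str.strip raw)))

def normalize_platforms_alt (platform_args : List String) : List String :=
  (platform_args.foldl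
    (fun st item =>
      if item = "" then st
      else ((PySem.Str.split? item ",").getD []).foldl pvStepB st)
    ([], PySem.Set.empty)).1
  -- Python raises ValueError when the result is empty; excluded by Pre_

-- ===== PRECONDITION & SPEC =====
-- the comma-separated tokens of the non-empty argument strings, and their stripped-lowered keys
def pvTokens (platform_args : List String) : List String :=
  platform_args.flatMap (fun item => if item = "" then [] else (PySem.Str.split? item ",").getD [])
def pvKeys (platform_args : List String) : List String :=
  ((pvTokens platform_args).map (fun t => PySem.Str.lower (PySem.Str.strip t))).filter (· ≠ "")

-- Pre_ = exactly the inputs where Python A returns: every non-blank token lowers to an allowed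
-- platform (else the 'Unsupported platform' ValueError) and at least one such token exists
-- (else the 'At least one valid platform is required' ValueError).
def Pre_normalize_platforms (platform_args : List String) : Prop :=
  (∀ k ∈ pvKeys platform_args, k ∈ pvALLOWED) ∧ pvKeys platform_args ≠ []
instance (platform_args : List String) : Decidable (Pre_normalize_platforms platform_args) := by
  unfold Pre_normalize_platforms; infer_instance

def pvWitness_normalize_platforms : List String := ["x, Zhihu", "x"]

def Spec_normalize_platforms (platform_args : List String) (out : List String) : Prop := out = normalize_platforms_alt platform_args
instance (platform_args : List String) (out : List String) : Decidable (Spec_normalize_platforms platform_args out) := by unfold Spec_normalize_platforms; infer_instance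

-- ===== CLAIM (what is proved, stated in full; the proofs are below) =====
def Claim_equal_normalize_platforms : Prop := ∀ (platform_args : List String), Dom_normalize_platforms platform_args → Pre_normalize_platforms platform_args → Spec_normalize_platforms platform_args (normalize_platforms platform_args)

-- ===== LEMMAS AND PROOFS =====

-- strip is idempotent (needed because A's second pass re-strips the already-stripped raw_items)
lemma chars_strip_idem (s : List Char) :
    PySem.Chars.strip (PySem.Chars.strip s) = PySem.Chars.strip s := by
  unfold PySem.Chars.strip PySem.Chars.rstrip PySem.Chars.lstrip
  set p := PySem.Chars.isspace with hp
  set t := List.dropWhile p s with ht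
  set u := List.dropWhile p t.reverse with hu
  have h1 : List.dropWhile p u.reverse = u.reverse := by
    rw [List.dropWhile_eq_self_iff]
    intro hl
    have hpre : u.reverse <+: t := by
      have h2 : u <:+ t.reverse := List.dropWhile_suffix p
      have h3 := List.reverse_prefix (l₁ := u) (l₂ := t.reverse)
      simpa using h3.mpr h2
    have htne : t ≠ [] := by
      intro h
      have h4 := hpre.length_le
      rw [h] at h4; simp at h4; simp [h4] at hl
    have hget : u.reverse[0] = t[0]'(List.length_pos_iff.mpr htne) :=
      List.IsPrefix.getElem hpre _
    rw [hget]
    have h0 : t[0]'(List.length_pos_iff.mpr htne) = t.head htne :=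
      List.getElem_zero_eq_head (List.length_pos_iff.mpr htne)
    rw [h0]
    simp only [Bool.not_eq_true]
    exact List.head_dropWhile_not p htne
  rw [h1, List.reverse_reverse, hu, List.dropWhile_idempotent]

lemma str_strip_idem (s : String) :
    PySem.Str.strip (PySem.Str.strip s) = PySem.Str.strip s := by
  simp [PySem.Str.strip, chars_strip_idem]

-- a token whose lowered key is blank, disallowed, or already seen leaves the state unchanged
def pvAbs (st : List String × PySem.Set String) (t : String) : Prop :=
  PySem.Str.lower (PySem.Str.strip t) = "" ∨
  PySem.Str.lower (PySem.Str.strip t) ∉ pvALLOWED ∨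
  st.2.contains (PySem.Str.lower (PySem.Str.strip t)) = true

lemma stepA_absorb (st : List String × PySem.Set String) (t : String) (h : pvAbs st t) :
    pvStepA st t = st := by
  unfold pvStepA
  rcases h with h | h | h
  · simp [h]
  · simp [h]
  · simp only [PySem.Set.contains, List.contains_iff_mem] at h
    simp [h]

lemma pvAbs_mono (st : List String × PySem.Set String) (t u : String) (h : pvAbs st t) :
    pvAbs (pvStepA st u) t := by
  rcases h with h | h | h
  · exact Or.inl h
  · exact Or.inr (Or.inl h)
  · refine Or.inr (Or.inr ?_)
    unfold pvStepA
    split_ifs <;> simp_all [PySem.Set.contains, PySem.Set.add]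

lemma pvAbs_step (st : List String × PySem.Set String) (raw : String) :
    pvAbs (pvStepA st raw) (PySem.Str.strip raw) := by
  unfold pvAbs
  rw [str_strip_idem]
  by_cases h1 : PySem.Str.lower (PySem.Str.strip raw) = ""
  · exact Or.inl h1
  by_cases h2 : PySem.Str.lower (PySem.Str.strip raw) ∈ pvALLOWED
  · refine Or.inr (Or.inr ?_)
    unfold pvStepA
    split_ifs with g1 <;> simp_all [PySem.Set.contains, PySem.Set.add]
  · exact Or.inr (Or.inl h2)

-- the raw-dedup fold factors through its list accumulator
lemma dfold_factor (ts : List String) (racc : List String) (rseen : PySem.Set String) :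
    ts.foldl pvDStep (racc, rseen) =
      (racc ++ (ts.foldl pvDStep ([], rseen)).1, (ts.foldl pvDStep ([], rseen)).2) := by
  induction ts generalizing racc rseen with
  | nil => simp
  | cons raw ts ih =>
    simp only [List.foldl_cons]
    by_cases h1 : PySem.Str.strip raw = ""
    · rw [show pvDStep (racc, rseen) raw = (racc, rseen) from by unfold pvDStep; simp [h1],
          show pvDStep ([], rseen) raw = ([], rseen) from by unfold pvDStep; simp [h1]]
      exact ih racc rseen
    by_cases h2 : PySem.Str.strip raw ∈ rseen
    · rw [show pvDStep (racc, rseen) raw = (racc, rseen) from by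
            unfold pvDStep; simp [PySem.Set.contains, List.contains_iff_mem, h1, h2],
          show pvDStep ([], rseen) raw = ([], rseen) from by
            unfold pvDStep; simp [PySem.Set.contains, List.contains_iff_mem, h1, h2]]
      exact ih racc rseen
    · rw [show pvDStep (racc, rseen) raw
            = (racc ++ [PySem.Str.strip raw], rseen.add (PySem.Str.strip raw)) from by
            unfold pvDStep; simp [PySem.Set.contains, List.contains_iff_mem, h1, h2],
          show pvDStep ([], rseen) raw
            = ([PySem.Str.strip raw], rseen.add (PySem.Str.strip raw)) from by
            unfold pvDStep; simp [PySem.Set.contains, List.contains_iff_mem, h1, h2]]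
      rw [ih (racc ++ [PySem.Str.strip raw]), ih [PySem.Str.strip raw]]
      simp

-- CENTRAL LEMMA: running A's second-pass step over a raw-deduped token list is the same as
-- running it over the tokens themselves, provided every already-seen raw item is absorbed
lemma fold_dedup_eq (ts : List String) (rseen : PySem.Set String)
    (st : List String × PySem.Set String) (hinv : ∀ s ∈ rseen, pvAbs st s) :
    (ts.foldl pvDStep ([], rseen)).1.foldl pvStepA st = ts.foldl pvStepA st := by
  induction ts generalizing rseen st with
  | nil => rfl
  | cons raw ts ih =>
    simp only [List.foldl_cons]
    by_cases h1 : PySem.Str.strip raw = ""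
    · have hA : pvStepA st raw = st := by
        apply stepA_absorb
        exact Or.inl (by rw [h1]; rfl)
      rw [hA]
      have : pvDStep ([], rseen) raw = ([], rseen) := by unfold pvDStep; simp [h1]
      rw [this]
      exact ih rseen st hinv
    by_cases h2 : PySem.Str.strip raw ∈ rseen
    · have hA : pvStepA st raw = st := by
        apply stepA_absorb
        have := hinv _ h2
        unfold pvAbs at this ⊢
        rwa [str_strip_idem] at this
      rw [hA]
      have : pvDStep ([], rseen) raw = ([], rseen) := by
        unfold pvDStep; simp [PySem.Set.contains, List.contains_iff_mem, h1, h2]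
      rw [this]
      exact ih rseen st hinv
    · have hd : pvDStep ([], rseen) raw =
          ([PySem.Str.strip raw], rseen.add (PySem.Str.strip raw)) := by
        unfold pvDStep; simp [PySem.Set.contains, List.contains_iff_mem, h1, h2]
      rw [hd, dfold_factor]
      simp only [List.singleton_append, List.foldl_cons]
      have hs : pvStepA st (PySem.Str.strip raw) = pvStepA st raw := by
        unfold pvStepA; rw [str_strip_idem]
      rw [hs]
      apply ih
      intro s hs'
      simp only [PySem.Set.add, PySem.Set.contains, List.contains_iff_mem, h2, if_false] at hs'
      rcases List.mem_append.mp hs' with h | h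
      · exact pvAbs_mono _ _ _ (hinv s h)
      · rw [List.mem_singleton.mp h]
        exact pvAbs_step st raw

lemma stepB_eq : pvStepB = pvStepA := rfl

lemma fold_T (args : List String) (st : List String × PySem.Set String) :
    (args.flatMap (fun item => if item = "" then [] else normalize_list item)).foldl pvStepA st
      = args.foldl (fun st item =>
          if item = "" then st
          else ((PySem.Str.split? item ",").getD []).foldl pvStepB st) st := by
  induction args generalizing st with
  | nil => simp
  | cons a args ih =>
    simp only [List.flatMap_cons, List.foldl_append, List.foldl_cons]
    by_cases h : a = ""
    · simp only [h, if_true, reduceIte, List.foldl_nil]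
      exact ih st
    · simp only [h, if_false, reduceIte]
      rw [← ih]
      congr 1
      rw [stepB_eq]
      unfold normalize_list
      exact fold_dedup_eq _ _ st (by intro s hs; simp [PySem.Set.empty] at hs)

lemma main_eq (platform_args : List String) :
    normalize_platforms platform_args = normalize_platforms_alt platform_args := by
  unfold normalize_platforms normalize_platforms_alt
  have hfun : (fun (acc : List String) item => if item = "" then acc else acc ++ normalize_list item)
      = (fun acc item => acc ++ if item = "" then [] else normalize_list item) := by
    funext acc item; split <;> simp
  rw [hfun, PySem.List.foldl_append_eq_flatMap, List.nil_append]
  exact congrArg Prod.fst (fold_T platform_args ([], PySem.Set.empty))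

-- ===== VERDICT (by name: the statement is the Claim_ definition above) =====
theorem normalize_platforms_spec : Claim_equal_normalize_platforms := by
  intro args _ _
  unfold Spec_normalize_platforms
  exact main_eq args
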